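-- pv_equiv track=rewrite | github.com/SouissiAlaa12/PythonProject | words_in_proteome.py | search_words_in_proteome
-- ===== SOURCE A (Python) =====
-- def search_words_in_proteome(d_pr, l_wor):
--     d_fw = {}
--     for w in l_wor:
--         count = 0
--         for i in d_pr:
--             if w in d_pr[i]:
--                 count += 1
--         if count != 0:
--             d_fw[w] = count
--
--     return d_fw
-- ===== SOURCE B (Python) =====
-- def search_words_in_proteome(d_pr, l_wor):
--     # Substring-index approach: instead of running a substring search per (word,
--     # protein) pair, build for each protein the SET of all its substrings whose
--     # length is a word length, intersect with the word set, and tally the hits.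
--     words = list(dict.fromkeys(l_wor))
--     word_set = set(words)
--     lengths = {len(w) for w in words}
--     counts = {w: 0 for w in words}
--     for prot in d_pr.values():
--         subs = {prot[i:i + L] for L in lengths for i in range(len(prot) - L + 1)}
--         for w in subs & word_set:
--             counts[w] += 1
--     return {w: c for w, c in counts.items() if c != 0}
-- ===== Notes on version B (the rewrite author's own statement) =====
-- stated objective: faster
-- what changed: B replaces A's per-(word,protein) substring searches by a substring index: for each protein it enumerates once the set of all its substrings at the word lengths, intersects that set with the (deduplicated) word set, and bumps one counter per hit, so no substring-search routine runs at all and the per-protein work no longer scales with the number of words.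
import Mathlib
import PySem

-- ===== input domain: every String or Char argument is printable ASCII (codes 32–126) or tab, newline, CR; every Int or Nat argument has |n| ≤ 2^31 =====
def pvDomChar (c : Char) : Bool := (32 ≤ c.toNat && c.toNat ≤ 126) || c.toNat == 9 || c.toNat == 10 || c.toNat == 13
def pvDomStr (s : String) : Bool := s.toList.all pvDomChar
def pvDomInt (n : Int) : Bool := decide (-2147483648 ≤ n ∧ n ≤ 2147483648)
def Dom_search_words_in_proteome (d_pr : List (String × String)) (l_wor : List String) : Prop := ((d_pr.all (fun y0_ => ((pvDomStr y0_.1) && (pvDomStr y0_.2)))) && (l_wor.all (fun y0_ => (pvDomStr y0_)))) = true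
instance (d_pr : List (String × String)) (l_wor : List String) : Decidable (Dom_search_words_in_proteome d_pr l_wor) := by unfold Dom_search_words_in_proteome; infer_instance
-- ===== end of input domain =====

-- B replaces the per-(word, protein) substring search by a substring index: per protein it
-- enumerates the set of substrings at the word lengths, intersects with the word set and
-- tallies the hits; same results, proved equal below (objective: faster; measured faster in a timing run).

-- ===== PORT A =====
-- A: for each word, count the proteome entries whose value contains it; keep nonzero counts in a dict.
def search_words_in_proteome (d_pr : List (String × String)) (l_wor : List String) : List (String × Int) :=
  let d := PySem.Dict.ofList d_pr
  let d_fw := l_wor.foldl (fun d_fw w =>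
    let count : Int := d.keys.foldl
      (fun count i => if PySem.Str.isIn w (d.getD i "") then count + 1 else count) 0
    if count ≠ 0 then d_fw.insert w count else d_fw) PySem.Dict.empty
  d_fw.items

-- ===== PORT B =====
-- B: dedup the words, collect the word lengths, init a counter dict over the words; for each
-- protein build the SET of its substrings at those lengths ({prot[i:i+L] …}), intersect with
-- the word set, bump the counter of every hit (the bumps commute: hits is duplicate-free and
-- the counter's keys/order are fixed by its initialisation, so Python's set-iteration order
-- cannot affect the result); finally keep the nonzero items.
def search_words_in_proteome_alt (d_pr : List (String × String)) (l_wor : List String) : List (String × Int) :=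
  let d := PySem.Dict.ofList d_pr
  let words := PySem.List.dedup l_wor
  let word_set : PySem.Set String := PySem.Set.ofList words
  let lengths : PySem.Set Int := PySem.Set.ofList (words.map (fun w => (w.length : Int)))
  let counts0 := words.foldl (fun c w => c.insert w (0 : Int)) PySem.Dict.empty
  let counts := d.values.foldl (fun c prot =>
    let subs : PySem.Set String := lengths.foldl (fun s L =>
      (PySem.List.pyRange 0 ((prot.length : Int) - L + 1) 1).foldl
        (fun s i => PySem.Set.add s (PySem.Str.slice prot (some i) (some (i + L)))) s)
      PySem.Set.empty
    let hits := PySem.Set.inter subs word_set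
    hits.foldl (fun c w => c.modify w 0 (· + 1)) c) counts0
  counts.items.filter (fun e => decide (e.2 ≠ 0))

-- ===== PRECONDITION & SPEC =====
def Spec_search_words_in_proteome (d_pr : List (String × String)) (l_wor : List String) (out : List (String × Int)) : Prop := out = search_words_in_proteome_alt d_pr l_wor
instance (d_pr : List (String × String)) (l_wor : List String) (out : List (String × Int)) : Decidable (Spec_search_words_in_proteome d_pr l_wor out) := by unfold Spec_search_words_in_proteome; infer_instance

-- ===== CLAIM (what is proved, stated in full; the proofs are below) =====
def Claim_equal_search_words_in_proteome : Prop := ∀ (d_pr : List (String × String)) (l_wor : List String), Dom_search_words_in_proteome d_pr l_wor → Spec_search_words_in_proteome d_pr l_wor (search_words_in_proteome d_pr l_wor)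

-- ===== LEMMAS AND PROOFS =====

-- the per-word count A computes: number of dict keys whose value contains w
def pvCnt (d : PySem.Dict String String) (w : String) : Int :=
  (d.keys.countP (fun i => PySem.Str.isIn w (d.getD i "")) : Int)

-- the entry A's result dict carries for w (none when the count is zero)
def pvG (d : PySem.Dict String String) (w : String) : Option (String × Int) :=
  if pvCnt d w ≠ 0 then some (w, pvCnt d w) else none

-- A's dict-building fold, characterised: items = filterMap pvG over the running dedup of the words
lemma foldA (d : PySem.Dict String String) (l S : List String) (d0 : PySem.Dict String Int)
    (h : d0.items = S.filterMap (pvG d)) :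
    (l.foldl (fun dfw w => if pvCnt d w ≠ 0 then dfw.insert w (pvCnt d w) else dfw) d0).items
      = (PySem.Set.update S l).filterMap (pvG d) := by
  induction l generalizing S d0 with
  | nil => simpa [PySem.Set.update] using h
  | cons w t ih =>
    simp only [List.foldl_cons]
    have hupd : PySem.Set.update S (w :: t) = PySem.Set.update (PySem.Set.add S w) t := by
      simp [PySem.Set.update]
    rw [hupd]
    by_cases hmem : w ∈ S
    · have hadd : PySem.Set.add S w = S := by simp [PySem.Set.add, hmem]
      rw [hadd]
      by_cases hc : pvCnt d w ≠ 0
      · simp only [if_pos hc]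
        have hwit : (w, pvCnt d w) ∈ d0.items := by
          rw [h]
          exact List.mem_filterMap.2 ⟨w, hmem, by simp [pvG, hc]⟩
        have hcont : d0.contains w = true := by
          rw [PySem.Dict.contains_iff_mem_keys]
          simp only [PySem.Dict.keys]
          exact List.mem_map.2 ⟨(w, pvCnt d w), hwit, rfl⟩
        apply ih
        rw [PySem.Dict.items_insert_of_contains d0 (pvCnt d w) hcont, h, List.map_filterMap]
        apply List.filterMap_congr
        intro a _
        simp only [pvG]
        by_cases ha : pvCnt d a ≠ 0
        · by_cases haw : a = w
          · subst haw; simp [ha]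
          · simp [ha, haw]
        · simp [ha]
      · simp only [if_neg hc]
        exact ih S d0 h
    · have hadd : PySem.Set.add S w = S ++ [w] := by simp [PySem.Set.add, hmem]
      rw [hadd]
      by_cases hc : pvCnt d w ≠ 0
      · simp only [if_pos hc]
        have hcont : d0.contains w = false := by
          rw [Bool.eq_false_iff, Ne, PySem.Dict.contains_iff_mem_keys]
          intro hk
          simp only [PySem.Dict.keys, h] at hk
          obtain ⟨p, hp, hp1⟩ := List.mem_map.1 hk
          obtain ⟨a, haS, hga⟩ := List.mem_filterMap.1 hp
          have haw : a = p.1 := by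
            simp only [pvG] at hga
            by_cases hca : pvCnt d a ≠ 0
            · rw [if_pos hca] at hga
              cases hga
              rfl
            · rw [if_neg hca] at hga
              cases hga
          exact hmem (hp1 ▸ haw ▸ haS)
        apply ih
        rw [PySem.Dict.items_insert_of_not_contains d0 (pvCnt d w) hcont, h,
          List.filterMap_append]
        simp [pvG, hc]
      · simp only [if_neg hc]
        apply ih
        rw [h, List.filterMap_append]
        simp [pvG, hc]

-- membership in B's substring set for one protein: y is there iff it is some slice
-- prot[i:i+L] with L one of the collected lengths and i in the Python range
lemma mem_subs (prot : String) (Ls : List Int) (s0 : PySem.Set String) (y : String) :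
    y ∈ Ls.foldl (fun s L =>
        (PySem.List.pyRange 0 ((prot.length : Int) - L + 1) 1).foldl
          (fun s i => PySem.Set.add s (PySem.Str.slice prot (some i) (some (i + L)))) s) s0
      ↔ y ∈ s0 ∨ ∃ L ∈ Ls, ∃ i : Int, 0 ≤ i ∧ i < (prot.length : Int) - L + 1 ∧
          y = PySem.Str.slice prot (some i) (some (i + L)) := by
  induction Ls generalizing s0 with
  | nil => simp
  | cons L t ih =>
    simp only [List.foldl_cons]
    rw [ih]
    rw [PySem.Set.mem_foldl_add]
    constructor
    · rintro (⟨hy | ⟨i, hi, hy⟩⟩ | ⟨L', hL', i, h0, h1, hy⟩)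
      · exact Or.inl hy
      · refine Or.inr ⟨L, by simp, i, ?_, ?_, hy⟩
        · exact (PySem.List.mem_pyRange_one.1 hi).1
        · exact (PySem.List.mem_pyRange_one.1 hi).2
      · exact Or.inr ⟨L', by simp [hL'], i, h0, h1, hy⟩
    · rintro (hy | ⟨L', hL', i, h0, h1, hy⟩)
      · exact Or.inl (Or.inl hy)
      · rcases List.mem_cons.1 hL' with h | h
        · subst h
          exact Or.inl (Or.inr ⟨i, PySem.List.mem_pyRange_one.2 ⟨h0, h1⟩, hy⟩)
        · exact Or.inr ⟨L', h, i, h0, h1, hy⟩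

-- a slice prot[i:i+L] (0 ≤ i, 0 ≤ L) is a contiguous piece, hence a substring of prot
lemma slice_isIn (prot : String) (i L : Int) (h0 : 0 ≤ i) (hL : 0 ≤ L) :
    PySem.Str.isIn (PySem.Str.slice prot (some i) (some (i + L))) prot = true := by
  rw [PySem.Str.isIn_iff_infix, PySem.Str.toList_slice, PySem.Chars.slice_eq_listSlice,
    PySem.List.slice_toNat _ h0 (by omega)]
  exact ((prot.toList.drop i.toNat).take_prefix _).isInfix.trans
    (prot.toList.drop_suffix i.toNat).isInfix

-- conversely, a word of length L that occurs in prot IS the slice at its first occurrence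
lemma isIn_mem_range (prot v : String) (h : PySem.Str.isIn v prot = true) :
    ∃ i : Int, 0 ≤ i ∧ i < (prot.length : Int) - (v.length : Int) + 1 ∧
      v = PySem.Str.slice prot (some i) (some (i + (v.length : Int))) := by
  have hinf : v.toList <:+: prot.toList := (PySem.Str.isIn_iff_infix v prot).1 h
  obtain ⟨j, hpre⟩ : ∃ j : Nat, v.toList <+: prot.toList.drop j := by
    obtain ⟨p, s, hps⟩ := hinf
    refine ⟨p.length, ?_⟩
    rw [← hps, List.append_assoc, List.drop_left]
    exact v.toList.prefix_append s
  have hlenv : v.length = v.toList.length := String.length_toList.symm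
  have hlenp : prot.length = prot.toList.length := String.length_toList.symm
  have hle : v.toList.length ≤ prot.toList.length - j := by
    simpa using hpre.length_le
  by_cases hj : j ≤ prot.toList.length
  · refine ⟨(j : Int), by omega, by omega, ?_⟩
    apply String.toList_inj.1
    rw [PySem.Str.toList_slice, PySem.Chars.slice_eq_listSlice,
      PySem.List.slice_toNat _ (by omega) (by omega)]
    have h1 : ((j : Int) + (v.length : Int)).toNat - (j : Int).toNat = v.toList.length := by
      omega
    rw [h1, Int.toNat_natCast, Eq.symm (List.prefix_iff_eq_take.1 hpre)]
  · -- j past the end: the dropped list is empty, so v = "" and i = 0 works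
    have hnil : prot.toList.drop j = [] := List.drop_eq_nil_of_le (by omega)
    have hv : v.toList = [] := List.eq_nil_of_prefix_nil (hnil ▸ hpre)
    refine ⟨0, le_refl 0, by omega, ?_⟩
    apply String.toList_inj.1
    rw [PySem.Str.toList_slice, PySem.Chars.slice_eq_listSlice,
      PySem.List.slice_toNat _ (by omega) (by omega)]
    simp [hv, hlenv]

-- B's inner per-protein fold over the hit set: keys unchanged, each hit's counter +1
lemma hits_fold_getD (hs : List String) (c : PySem.Dict String Int) (v : String)
    (hnd : hs.Nodup) :
    (hs.foldl (fun c w => c.modify w 0 (· + 1)) c).getD v 0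
      = c.getD v 0 + (if v ∈ hs then 1 else 0) := by
  induction hs generalizing c with
  | nil => simp
  | cons w t ih =>
    simp only [List.foldl_cons]
    rw [ih (c.modify w 0 (· + 1)) (List.nodup_cons.1 hnd).2, PySem.Dict.getD_modify]
    by_cases hvw : v = w
    · subst hvw
      have hvt : v ∉ t := (List.nodup_cons.1 hnd).1
      simp [hvt]
    · simp [hvw, List.mem_cons]

lemma hits_fold_keys (hs : List String) (c : PySem.Dict String Int)
    (h : ∀ w ∈ hs, w ∈ c.keys) :
    (hs.foldl (fun c w => c.modify w 0 (· + 1)) c).keys = c.keys := by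
  induction hs generalizing c with
  | nil => rfl
  | cons w t ih =>
    simp only [List.foldl_cons]
    have hkeys : (c.modify w 0 (· + 1)).keys = c.keys := by
      rw [PySem.Dict.keys_modify,
        PySem.Dict.keys_insert_of_contains _ _ ((PySem.Dict.contains_iff_mem_keys _ _).2 (h w (by simp)))]
    rw [ih _ (by intro u hu; rw [hkeys]; exact h u (by simp [hu])), hkeys]

-- the filtered counter items are exactly the filterMap A's dict carries
lemma map_filter_eq_filterMap (f : String → Int) (g : String → Option (String × Int))
    (hg : ∀ w, g w = if f w ≠ 0 then some (w, f w) else none) (ws : List String) :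
    ((ws.map (fun w => (w, f w))).filter (fun e => decide (e.2 ≠ 0))) = ws.filterMap g := by
  simp only [ne_eq, decide_not]
  induction ws with
  | nil => rfl
  | cons w t ih =>
    by_cases hf : f w = 0 <;> simp [hg, hf, ih]

-- sets built by repeated add stay duplicate-free
lemma nodup_foldl_add {α β : Type} [BEq α] [LawfulBEq α] (l : List β) (f : β → α)
    (s : PySem.Set α) (h : s.Nodup) :
    (l.foldl (fun s b => PySem.Set.add s (f b)) s).Nodup := by
  induction l generalizing s with
  | nil => exact h
  | cons b t ih => exact ih _ (PySem.Set.nodup_add _ _ h)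

lemma nodup_subsFold (prot : String) (Ls : List Int) (s0 : PySem.Set String)
    (h : s0.Nodup) :
    (Ls.foldl (fun s L =>
      (PySem.List.pyRange 0 ((prot.length : Int) - L + 1) 1).foldl
        (fun s i => PySem.Set.add s (PySem.Str.slice prot (some i) (some (i + L)))) s) s0).Nodup := by
  induction Ls generalizing s0 with
  | nil => exact h
  | cons L t ih => exact ih _ (nodup_foldl_add _ _ _ h)

-- B's outer fold over the protein values, hit sets abstracted: keys unchanged …
lemma outerB_keys (vs : List String) (hs : String → List String) (c : PySem.Dict String Int)
    (h : ∀ p, ∀ w ∈ hs p, w ∈ c.keys) :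
    (vs.foldl (fun c p => (hs p).foldl (fun c w => c.modify w 0 (· + 1)) c) c).keys = c.keys := by
  induction vs generalizing c with
  | nil => rfl
  | cons p t ih =>
    simp only [List.foldl_cons]
    have hk := hits_fold_keys (hs p) c (h p)
    rw [ih _ (by intro q u hu; rw [hk]; exact h q u hu), hk]

-- … and each word's counter ends at the number of proteins whose hit set contains it
lemma outerB_getD (vs : List String) (hs : String → List String)
    (hnd : ∀ p, (hs p).Nodup) (c : PySem.Dict String Int) (v : String) :
    (vs.foldl (fun c p => (hs p).foldl (fun c w => c.modify w 0 (· + 1)) c) c).getD v 0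
      = c.getD v 0 + ((vs.countP (fun p => decide (v ∈ hs p)) : Nat) : Int) := by
  induction vs generalizing c with
  | nil => simp
  | cons p t ih =>
    simp only [List.foldl_cons, List.countP_cons]
    rw [ih _, hits_fold_getD (hs p) c v (hnd p)]
    by_cases hm : v ∈ hs p
    · simp [hm]
      ring
    · simp [hm]

-- A's per-word key count equals a count over the values list
lemma pvCnt_eq_values (d : PySem.Dict String String) (hnd : d.keys.Nodup) (w : String) :
    pvCnt d w = (d.values.countP (fun p => PySem.Str.isIn w p) : Int) := by
  rw [PySem.Dict.values_eq_map_keys d hnd "", List.countP_map]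
  rfl

-- ===== VERDICT (by name: the statement is the Claim_ definition above) =====
theorem search_words_in_proteome_spec : Claim_equal_search_words_in_proteome := by
  intro d_pr l_wor _
  unfold Spec_search_words_in_proteome search_words_in_proteome search_words_in_proteome_alt
  dsimp only
  set d := PySem.Dict.ofList d_pr with hd
  have hnd : d.keys.Nodup := PySem.Dict.nodup_keys_ofList d_pr
  -- A side
  have hA : (l_wor.foldl (fun d_fw w =>
      let count : Int := d.keys.foldl
        (fun count i => if PySem.Str.isIn w (d.getD i "") then count + 1 else count) 0
      if count ≠ 0 then d_fw.insert w count else d_fw) PySem.Dict.empty).items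
      = (PySem.Set.ofList l_wor).filterMap (pvG d) := by
    have hstep : (fun (d_fw : PySem.Dict String Int) (w : String) =>
        let count : Int := d.keys.foldl
          (fun count i => if PySem.Str.isIn w (d.getD i "") then count + 1 else count) 0
        if count ≠ 0 then d_fw.insert w count else d_fw)
        = (fun dfw w => if pvCnt d w ≠ 0 then dfw.insert w (pvCnt d w) else dfw) := by
      funext dfw w
      simp only [PySem.List.foldl_if_add_one, zero_add, pvCnt]
    rw [hstep, foldA d l_wor [] PySem.Dict.empty rfl]
    congr 1
  rw [hA]
  -- B side
  set words := PySem.List.dedup l_wor with hw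
  have hwords : words = PySem.Set.ofList l_wor := PySem.List.dedup_eq_ofList l_wor
  have hwnd : words.Nodup := by rw [hwords]; exact PySem.Set.nodup_ofList l_wor
  set counts0 := words.foldl (fun c w => c.insert w (0 : Int)) PySem.Dict.empty with hc0
  have hkeys0 : counts0.keys = words := by
    rw [hc0, PySem.Dict.keys_foldl_insert]
    simpa [PySem.Dict.keys, PySem.Dict.empty, PySem.Set.update, PySem.Set.ofList_eq_foldl]
      using PySem.Set.ofList_eq_self_of_nodup words hwnd
  have hitems0 : counts0.items = words.map (fun w => (w, (0 : Int))) := by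
    rw [hc0]
    exact PySem.Dict.items_foldl_insert_fresh words id (fun _ => (0 : Int)) PySem.Dict.empty
      (by intro a _; simp) (by simpa using hwnd)
  have hgetD0 : ∀ v ∈ words, counts0.getD v 0 = 0 := by
    intro v hv
    have hm : (v, (0 : Int)) ∈ counts0.items := by
      rw [hitems0]; exact List.mem_map_of_mem hv
    exact PySem.Dict.getD_of_mem_items counts0 hm (by rw [hkeys0]; exact hwnd) 0
  -- the hit set of one protein
  set lengths : PySem.Set Int := PySem.Set.ofList (words.map (fun w => (w.length : Int)))
    with hlen
  set hitsOf := fun prot : String =>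
    PySem.Set.inter (lengths.foldl (fun s L =>
      (PySem.List.pyRange 0 ((prot.length : Int) - L + 1) 1).foldl
        (fun s i => PySem.Set.add s (PySem.Str.slice prot (some i) (some (i + L)))) s)
      PySem.Set.empty) (PySem.Set.ofList words) with hhits
  have hhitsnd : ∀ p, (hitsOf p).Nodup := by
    intro p
    rw [hhits]
    exact PySem.Set.nodup_inter _ _
      (nodup_subsFold p lengths PySem.Set.empty List.nodup_nil)
  have hhitssub : ∀ p, ∀ w ∈ hitsOf p, w ∈ words := by
    intro p w hwm
    rw [hhits] at hwm
    exact (PySem.Set.mem_ofList _ _).1 ((PySem.Set.mem_inter _ _ _).1 hwm).2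
  have hhitsmem : ∀ p, ∀ v ∈ words, (v ∈ hitsOf p ↔ PySem.Str.isIn v p = true) := by
    intro p v hv
    rw [hhits]
    rw [PySem.Set.mem_inter, mem_subs]
    constructor
    · rintro ⟨h1 | ⟨L, hL, i, h0, h1, hy⟩, _⟩
      · exact absurd h1 (by simp [PySem.Set.empty])
      · rw [hlen] at hL
        obtain ⟨w', hw', hLw⟩ := List.mem_map.1 ((PySem.Set.mem_ofList _ _).1 hL)
        have hLw' : ((w'.length : Int)) = L := hLw
        subst hy
        exact slice_isIn p i L h0 (hLw' ▸ Int.natCast_nonneg w'.length)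
    · intro hIn
      obtain ⟨i, h0, h1, hy⟩ := isIn_mem_range p v hIn
      refine ⟨Or.inr ⟨(v.length : Int), ?_, i, h0, h1, hy⟩, (PySem.Set.mem_ofList _ _).2 hv⟩
      rw [hlen]
      exact (PySem.Set.mem_ofList _ _).2 (List.mem_map.2 ⟨v, hv, rfl⟩)
  -- B's outer fold, with the per-protein hit set abstracted
  set counts := d.values.foldl (fun c prot =>
    (hitsOf prot).foldl (fun c w => c.modify w 0 (· + 1)) c) counts0 with hcs
  have hkeys : counts.keys = words := by
    rw [hcs, outerB_keys d.values hitsOf counts0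
      (by intro p u hu; rw [hkeys0]; exact hhitssub p u hu), hkeys0]
  have hknd : counts.keys.Nodup := by rw [hkeys]; exact hwnd
  have hitems : counts.items = words.map (fun w => (w, pvCnt d w)) := by
    rw [PySem.Dict.items_eq_map_keys counts hknd 0, hkeys]
    apply List.map_congr_left
    intro w hwmem
    have hgd : counts.getD w 0 = pvCnt d w := by
      rw [hcs, outerB_getD d.values hitsOf hhitsnd counts0 w, hgetD0 w hwmem,
        pvCnt_eq_values d hnd w, zero_add]
      congr 1
      apply List.countP_congr
      intro p _
      simp [hhitsmem p w hwmem]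
    rw [hgd]
  rw [hitems, map_filter_eq_filterMap (pvCnt d) (pvG d) (fun w => rfl) words, hwords]
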